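-- pv_equiv track=rewrite | github.com/aaa2ppp/ya-algo-training5 | misc/ecf_161/D/py-/main.py | solve
-- ===== SOURCE A (Python) =====
-- def solve(n, a, d):
--     res = [0]*n
--     m = len(a)
--     b = [0]*(m+2)
--
--     for ii in range(n):
--         for i in range(m+2):
--             b[i] = 0
--
--         for i in range(m):
--             b[i]   += a[i]
--             b[i+2] += a[i]
--
--         i, j = 0, 0
--         while i < m:
--             if d[i] >= b[i+1]:
--                 a[j] = a[i]
--                 d[j] = d[i]
--                 j += 1
--             i += 1
--
--         if i-j == 0:
--             break
--
--         res[ii] = i-j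
--         m = j
--
--     return res
-- ===== SOURCE B (Python) =====
-- def solve(n, a, d):
--     # Event-driven linked-list simulation: keep alive elements in a doubly linked
--     # list over the original indices and, after the first full round, only re-check
--     # candidates adjacent to a removal.  Returns the same value as A; unlike A it
--     # does not mutate a or d.
--     m = len(a)
--     res = [0] * n
--     alive = [True] * m
--     prev = list(range(-1, m - 1))
--     nxt = list(range(1, m + 1))
--     cand = list(range(m))
--     r = 0
--     while r < n and cand:
--         dying = [i for i in cand
--                  if d[i] < (a[prev[i]] if prev[i] >= 0 else 0)
--                          + (a[nxt[i]] if nxt[i] < m else 0)]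
--         if not dying:
--             break
--         res[r] = len(dying)
--         r += 1
--         for i in dying:
--             alive[i] = False
--         for i in dying:
--             p, q = prev[i], nxt[i]
--             if p >= 0:
--                 nxt[p] = q
--             if q < m:
--                 prev[q] = p
--         cand = sorted({x for i in dying for x in (prev[i], nxt[i])
--                        if 0 <= x < m and alive[x]})
--     return res
-- ===== Notes on version B (the rewrite author's own statement) =====
-- stated objective: faster
-- what changed: Replaced A's per-round full re-scan (rebuild the neighbour-sum buffer over all survivors and compact the arrays in place every round) by an event-driven doubly linked list over the original indices: after the first round only candidates adjacent to a removal are re-checked, removals are spliced out of prev/next arrays, and new candidates are the surviving neighbours of the removed elements.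
import Mathlib
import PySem

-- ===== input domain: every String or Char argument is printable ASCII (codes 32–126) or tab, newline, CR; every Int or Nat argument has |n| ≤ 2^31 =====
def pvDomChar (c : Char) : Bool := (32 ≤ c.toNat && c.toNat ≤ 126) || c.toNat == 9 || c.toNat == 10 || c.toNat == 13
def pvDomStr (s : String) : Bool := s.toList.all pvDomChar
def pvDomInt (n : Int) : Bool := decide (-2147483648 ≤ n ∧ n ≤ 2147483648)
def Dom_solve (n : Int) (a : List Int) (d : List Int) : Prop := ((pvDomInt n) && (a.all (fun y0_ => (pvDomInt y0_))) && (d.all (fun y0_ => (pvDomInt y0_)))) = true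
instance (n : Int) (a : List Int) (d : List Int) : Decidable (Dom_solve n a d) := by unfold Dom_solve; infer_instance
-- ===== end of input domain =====

-- B replaces A's whole-array re-scan per round by an event-driven doubly linked list
-- over the original indices: after the first round only candidates adjacent to a
-- removal are re-checked.  A mutates its list arguments in place, B does not —
-- the equivalence proved here is about the return value only.

-- ===== PORT A =====
-- one iteration of `for i in range(m): b[i] += a[i]; b[i+2] += a[i]`
def buildBstep (a : List Int) (b : List Int) (i : Nat) : List Int :=
  let b1 := b.set i (b.getD i 0 + a.getD i 0)
  b1.set (i+2) (b1.getD (i+2) 0 + a.getD i 0)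

-- the zeroed buffer `b` of the round plus the accumulation loop; Python clears and
-- reuses one buffer, but cells beyond index m+1 are never read afterwards, so a
-- fresh zero buffer of size m+2 is exact.
def buildB (a : List Int) (m : Nat) : List Int :=
  (List.range m).foldl (buildBstep a) (List.replicate (m+2) 0)

-- the `while i < m` compaction loop (in-range list reads, so getD is exact under Pre_)
def compact (a : List Int) (d : List Int) (b : List Int) (m i j : Nat) :
    List Int × List Int × Nat :=
  if _h : i < m then
    if b.getD (i+1) 0 ≤ d.getD i 0 then
      compact (a.set j (a.getD i 0)) (d.set j (d.getD i 0)) b m (i+1) (j+1)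
    else
      compact a d b m (i+1) j
  else (a, d, j)
termination_by m - i

-- the `for ii in range(n)` loop carrying the mutated a, d, the logical size m and res
def outerA (r : Nat) (ii : Nat) (a : List Int) (d : List Int) (m : Nat)
    (res : List Int) : List Int :=
  match r with
  | 0 => res
  | r + 1 =>
    let b := buildB a m
    let t := compact a d b m 0 0
    let j := t.2.2
    if ((m : Int) - (j : Int)) = 0 then res
    else outerA r (ii+1) t.1 t.2.1 j (res.set ii ((m : Int) - (j : Int)))

def solve (n : Int) (a : List Int) (d : List Int) : List Int :=
  outerA n.toNat 0 a d a.length (List.replicate n.toNat 0)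

-- ===== PORT B =====
-- `(a[prev[i]] if prev[i] >= 0 else 0) + (a[nxt[i]] if nxt[i] < m else 0)`
-- (in-range list reads under Pre_, so getD is exact)
def nbr (a0 : List Int) (m : Nat) (pv nx : List Int) (i : Int) : Int :=
  (if 0 ≤ pv.getD i.toNat 0 then a0.getD (pv.getD i.toNat 0).toNat 0 else 0) +
  (if nx.getD i.toNat 0 < (m : Int) then a0.getD (nx.getD i.toNat 0).toNat 0 else 0)

-- one iteration of `for i in dying: p, q = prev[i], nxt[i]; …` (the splice loop)
def spliceStep (m : Nat) (st : List Int × List Int) (i : Int) : List Int × List Int :=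
  let p := st.1.getD i.toNat 0
  let q := st.2.getD i.toNat 0
  (if q < (m : Int) then st.1.set q.toNat p else st.1,
   if 0 ≤ p then st.2.set p.toNat q else st.2)

-- one `i` of the set comprehension `{x for i in dying for x in (prev[i], nxt[i]) if …}`
def candAdd (m : Nat) (alive : List Bool) (pv nx : List Int) (s : PySem.Set Int) (i : Int) :
    PySem.Set Int :=
  let p := pv.getD i.toNat 0
  let q := nx.getD i.toNat 0
  let s1 := if 0 ≤ p ∧ p < (m : Int) ∧ alive.getD p.toNat false = true then PySem.Set.add s p else s
  if 0 ≤ q ∧ q < (m : Int) ∧ alive.getD q.toNat false = true then PySem.Set.add s1 q else s1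

-- the `while r < n and cand` loop (fuel = number of still-allowed rounds, n - r)
def outerB (a0 d0 : List Int) (m : Nat) :
    Nat → Nat → List Bool → List Int → List Int → List Int → List Int → List Int
  | 0, _, _, _, _, _, res => res
  | fuel + 1, r, alive, pv, nx, cand, res =>
    if cand.isEmpty then res else
    let dying := cand.filter (fun i => decide (d0.getD i.toNat 0 < nbr a0 m pv nx i))
    if dying.isEmpty then res else
    let res' := res.set r ((dying.length : Int))
    let alive' := dying.foldl (fun al i => al.set i.toNat false) alive
    let st := dying.foldl (spliceStep m) (pv, nx)
    let cand' := PySem.List.sorted (dying.foldl (candAdd m alive' st.1 st.2) PySem.Set.empty)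
                   (fun x => x) false
    outerB a0 d0 m fuel (r + 1) alive' st.1 st.2 cand' res'

def solve_alt (n : Int) (a : List Int) (d : List Int) : List Int :=
  let m := a.length
  outerB a d m n.toNat 0 (List.replicate m true)
    ((List.range m).map (fun k => Int.ofNat k - 1))     -- list(range(-1, m-1))
    ((List.range m).map (fun k => Int.ofNat k + 1))     -- list(range(1, m+1))
    ((List.range m).map (fun k => Int.ofNat k))         -- list(range(m))
    (List.replicate n.toNat 0)

-- ===== PRECONDITION & SPEC =====
-- Pre_ excludes exactly the inputs on which A raises IndexError: at least one round runs
-- (n ≥ 1) while d is shorter than a, so the first round reads d past its end.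
def Pre_solve (n : Int) (a : List Int) (d : List Int) : Prop :=
  n ≤ 0 ∨ a.length ≤ d.length
instance (n : Int) (a : List Int) (d : List Int) : Decidable (Pre_solve n a d) := by
  unfold Pre_solve; infer_instance

def pvWitness_solve : Int × List Int × List Int := (3, [3, 1, 4], [5, 0, 9])

def Spec_solve (n : Int) (a : List Int) (d : List Int) (out : List Int) : Prop := out = solve_alt n a d
instance (n : Int) (a : List Int) (d : List Int) (out : List Int) : Decidable (Spec_solve n a d out) := by unfold Spec_solve; infer_instance

-- ===== CLAIM (what is proved, stated in full; the proofs are below) =====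
def Claim_equal_solve : Prop := ∀ (n : Int) (a : List Int) (d : List Int), Dom_solve n a d → Pre_solve n a d → Spec_solve n a d (solve n a d)

-- ===== LEMMAS AND PROOFS =====

-- ---------- generic list helpers ----------
lemma getD_set_ite (l : List Int) (i j : Nat) (v : Int) :
    (l.set i v).getD j 0 = if i = j ∧ i < l.length then v else l.getD j 0 := by
  simp [List.getD, List.getElem?_set]; split
  · split <;> simp_all
  · simp_all
lemma getD_set_ne (l : List Int) (i j : Nat) (v : Int) (h : i ≠ j) :
    (l.set i v).getD j 0 = l.getD j 0 := by
  rw [getD_set_ite, if_neg (fun hc => h hc.1)]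

lemma take_set_succ (l : List Int) (j : Nat) (v : Int) (h : j < l.length) :
    (l.set j v).take (j+1) = l.take j ++ [v] := by
  rw [List.take_set]
  have h1 : l.take (j+1) = l.take j ++ [l[j]] := by
    rw [List.take_add_one, List.getElem?_eq_getElem h]; rfl
  rw [h1, List.set_append_right] <;> simp [List.length_take_of_le h.le]

lemma set_append_len (c l : List Int) (v : Int) :
    (c ++ l).set c.length v = c ++ l.set 0 v := by
  rw [List.set_append_right] <;> simp

-- ---------- A reduced to a round-by-round functional recursion ----------
-- the result of the compaction walk, as a functional recursion over [i, m)
def sweep (a : List Int) (d : List Int) (b : List Int) (m i : Nat) : List (Int × Int) :=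
  if _h : i < m then
    if b.getD (i+1) 0 ≤ d.getD i 0 then
      (a.getD i 0, d.getD i 0) :: sweep a d b m (i+1)
    else sweep a d b m (i+1)
  else []
termination_by m - i

lemma foldB_length (a : List Int) (l : List Nat) (b0 : List Int) :
    (l.foldl (buildBstep a) b0).length = b0.length := by
  induction l generalizing b0 with
  | nil => rfl
  | cons i l ih => simp [List.foldl_cons, ih, buildBstep]
lemma buildB_getD_aux (a : List Int) (b0 : List Int) :
    ∀ (m : Nat) (k : Nat), m + 2 ≤ b0.length →
    ((List.range m).foldl (buildBstep a) b0).getD k 0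
      = b0.getD k 0 + (if k < m then a.getD k 0 else 0)
        + (if 2 ≤ k ∧ k - 2 < m then a.getD (k-2) 0 else 0) := by
  intro m
  induction m with
  | zero => intro k _; simp
  | succ m ih =>
    intro k hm
    have hm' : m + 2 ≤ b0.length := by omega
    rw [List.range_succ, List.foldl_append, List.foldl_cons, List.foldl_nil]
    have hB : ((List.range m).foldl (buildBstep a) b0).length = b0.length := foldB_length a _ b0
    simp only [buildBstep]
    rw [getD_set_ite, getD_set_ite, getD_set_ite]
    simp only [List.length_set, hB]
    by_cases h2 : k = m + 2
    · subst h2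
      rw [if_pos ⟨rfl, by omega⟩]
      rw [if_neg (show ¬(m = m + 2 ∧ m < b0.length) by omega)]
      rw [ih (m+2) hm']
      simp only [Nat.add_sub_cancel]
      rw [if_neg (show ¬(m + 2 < m) by omega),
          if_neg (show ¬(2 ≤ m + 2 ∧ m < m) by omega),
          if_neg (show ¬(m + 2 < m + 1) by omega),
          if_pos (show 2 ≤ m + 2 ∧ m < m + 1 by omega)]
      ring
    · by_cases h1 : k = m
      · subst h1
        rw [if_neg (show ¬(k + 2 = k ∧ k + 2 < b0.length) by omega)]
        rw [if_pos ⟨rfl, by omega⟩]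
        rw [ih k hm']
        rw [if_neg (show ¬(k < k) by omega), if_pos (show k < k + 1 by omega)]
        by_cases hk2 : 2 ≤ k
        · rw [if_pos (show 2 ≤ k ∧ k - 2 < k by omega),
              if_pos (show 2 ≤ k ∧ k - 2 < k + 1 by omega)]
          ring
        · rw [if_neg (show ¬(2 ≤ k ∧ k - 2 < k) by omega),
              if_neg (show ¬(2 ≤ k ∧ k - 2 < k + 1) by omega)]
          ring
      · rw [if_neg (show ¬(m + 2 = k ∧ m + 2 < b0.length) by omega)]
        rw [if_neg (show ¬(m = k ∧ m < b0.length) by omega)]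
        rw [ih k hm']
        split_ifs <;> first | omega | ring
lemma buildB_getD (a : List Int) (m : Nat) (k : Nat) :
    (buildB a m).getD k 0
      = (if k < m then a.getD k 0 else 0) + (if 2 ≤ k ∧ k - 2 < m then a.getD (k-2) 0 else 0) := by
  have h0 : (List.replicate (m+2) (0:Int)).getD k 0 = 0 := by
    simp [List.getD, List.getElem?_replicate]; split <;> rfl
  rw [buildB, buildB_getD_aux a _ m k (by simp), h0, zero_add]

def keepRec : Int → List Int → List Int → List (Int × Int)
  | _, [], _ => []
  | _, _ :: _, [] => []
  | prev, x :: a, y :: d =>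
    if prev + a.headD 0 ≤ y then (x, y) :: keepRec x a d else keepRec x a d

lemma keepRec_length_le (a : List Int) : ∀ (prev : Int) (d : List Int),
    (keepRec prev a d).length ≤ a.length := by
  induction a with
  | nil => intro prev d; simp [keepRec]
  | cons x a ih =>
    intro prev d
    cases d with
    | nil => simp [keepRec]
    | cons y d =>
      simp only [keepRec]
      split
      · simpa using Nat.succ_le_succ (ih x d)
      · exact le_trans (ih x d) (by simp)

def altKept (a : List Int) (d : List Int) : List ((Int × Int) × (Int × Int)) :=
  ((a.zip d).zip ((0 :: a.dropLast).zip (a.drop 1 ++ [0]))).filter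
    (fun q => q.2.1 + q.2.2 ≤ q.1.2)

def altLoop : Nat → List Int → List Int → List Int
  | 0, _, _ => []
  | r + 1, a, d =>
    let kept := altKept a d
    let removed : Int := (a.length : Int) - (kept.length : Int)
    if removed = 0 then []
    else removed :: altLoop r (kept.map (fun q => q.1.1)) (kept.map (fun q => q.1.2))

lemma altKept_eq_keepRec (a : List Int) : ∀ (d : List Int) (prev : Int),
    (((a.zip d).zip ((prev :: a.dropLast).zip (a.drop 1 ++ [0]))).filter
        (fun q => q.2.1 + q.2.2 ≤ q.1.2)).map (fun q => q.1)
      = keepRec prev a d := by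
  induction a with
  | nil => intro d prev; simp [keepRec]
  | cons x a ih =>
    intro d prev
    cases d with
    | nil => simp [keepRec]
    | cons y d =>
      cases a with
      | nil =>
        simp only [keepRec, List.dropLast, List.drop, List.zip, List.zipWith, List.nil_append]
        by_cases h : prev + (0:Int) ≤ y
        · have h' : prev ≤ y := by omega
          simp [List.filter, h']
        · have h' : ¬ prev ≤ y := by omega
          simp [List.filter, h']
      | cons z a' =>
        have hdl : (x :: z :: a').dropLast = x :: (z :: a').dropLast := rfl
        have hdr : (x :: z :: a').drop 1 ++ [(0:Int)] = z :: ((z :: a').drop 1 ++ [0]) := by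
          simp
        rw [hdl, hdr]
        simp only [List.zip_cons_cons, List.filter_cons, decide_eq_true_eq]
        simp only [keepRec, List.headD_cons]
        by_cases h : prev + z ≤ y
        · rw [if_pos h, if_pos h, List.map_cons, ih d x]
        · rw [if_neg h, if_neg h, ih d x]

lemma sweep_congr (b : List Int) (m : Nat) : ∀ (k i : Nat) (a₁ d₁ a₂ d₂ : List Int), m - i ≤ k →
    (∀ t, i ≤ t → t < m → a₁.getD t 0 = a₂.getD t 0 ∧ d₁.getD t 0 = d₂.getD t 0) →
    sweep a₁ d₁ b m i = sweep a₂ d₂ b m i := by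
  intro k
  induction k with
  | zero =>
    intro i a₁ d₁ a₂ d₂ hk _
    conv_lhs => rw [sweep]
    conv_rhs => rw [sweep]
    simp [show ¬ i < m by omega]
  | succ k ih =>
    intro i a₁ d₁ a₂ d₂ hk h
    by_cases hi : i < m
    · obtain ⟨ha, hd⟩ := h i le_rfl hi
      conv_lhs => rw [sweep]
      conv_rhs => rw [sweep]
      simp only [hi, dif_pos, ha, hd]
      have ht : sweep a₁ d₁ b m (i+1) = sweep a₂ d₂ b m (i+1) :=
        ih (i+1) a₁ d₁ a₂ d₂ (by omega) (fun t h1 h2 => h t (by omega) h2)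
      rw [ht]
    · conv_lhs => rw [sweep]
      conv_rhs => rw [sweep]
      simp [hi]

lemma compact_spec (b : List Int) (m : Nat) : ∀ (k i j : Nat) (a d : List Int), m - i ≤ k →
    j ≤ i → i ≤ m → m ≤ a.length → m ≤ d.length →
    (compact a d b m i j).2.2 = j + (sweep a d b m i).length ∧
    (compact a d b m i j).1.take (j + (sweep a d b m i).length)
      = a.take j ++ (sweep a d b m i).map Prod.fst ∧
    (compact a d b m i j).2.1.take (j + (sweep a d b m i).length)
      = d.take j ++ (sweep a d b m i).map Prod.snd ∧
    (compact a d b m i j).1.length = a.length ∧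
    (compact a d b m i j).2.1.length = d.length := by
  intro k
  induction k with
  | zero =>
    intro i j a d hk hj hi ha hd
    rw [compact, sweep]
    simp [show ¬ i < m by omega]
  | succ k ih =>
    intro i j a d hk hj hi ha hd
    by_cases hlt : i < m
    · rw [compact, sweep]
      by_cases hc : b.getD (i+1) 0 ≤ d.getD i 0
      · simp only [hlt, dif_pos, hc, if_pos]
        have hja : j < a.length := by omega
        have hjd : j < d.length := by omega
        obtain ⟨h1, h2, h3, h4, h5⟩ :=
          ih (i+1) (j+1) (a.set j (a.getD i 0)) (d.set j (d.getD i 0)) (by omega) (by omega)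
            (by omega) (by simpa using ha) (by simpa using hd)
        have hsw : sweep (a.set j (a.getD i 0)) (d.set j (d.getD i 0)) b m (i+1)
            = sweep a d b m (i+1) := by
          apply sweep_congr b m (m - (i+1)) (i+1) _ _ _ _ le_rfl
          intro t h1t h2t
          constructor <;> rw [getD_set_ite] <;> rw [if_neg (by omega)]
        rw [hsw] at h1 h2 h3
        refine ⟨by simp only [List.length_cons]; rw [h1]; omega, ?_, ?_, by simpa using h4, by simpa using h5⟩
        · have : j + (((a.getD i 0, d.getD i 0) :: sweep a d b m (i+1))).length
              = (j+1) + (sweep a d b m (i+1)).length := by simp; omega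
          rw [this, h2, take_set_succ a j _ hja]
          simp
        · have : j + (((a.getD i 0, d.getD i 0) :: sweep a d b m (i+1))).length
              = (j+1) + (sweep a d b m (i+1)).length := by simp; omega
          rw [this, h3, take_set_succ d j _ hjd]
          simp
      · simp only [hlt, dif_pos, hc, if_false]
        exact ih (i+1) j a d (by omega) (by omega) (by omega) ha hd
    · rw [compact, sweep]
      simp [hlt]

lemma sweep_eq_keepRec (a d : List Int) (m : Nat) (ha : m ≤ a.length) (hd : m ≤ d.length) :
    ∀ (k i : Nat), m - i ≤ k → i ≤ m →
    sweep a d (buildB a m) m i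
      = keepRec (if 1 ≤ i then a.getD (i-1) 0 else 0)
          ((a.drop i).take (m - i)) ((d.drop i).take (m - i)) := by
  intro k
  induction k with
  | zero =>
    intro i hk _
    rw [sweep]
    simp [show ¬ i < m by omega, show m - i = 0 by omega, keepRec]
  | succ k ih =>
    intro i hk hi
    by_cases hlt : i < m
    · have hia : i < a.length := by omega
      have hid : i < d.length := by omega
      have hA : (a.drop i).take (m - i) = a.getD i 0 :: ((a.drop (i+1)).take (m - (i+1))) := by
        rw [List.drop_eq_getElem_cons hia, show m - i = (m - (i+1)) + 1 by omega,
            List.take_succ_cons, List.getD_eq_getElem a 0 hia]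
      have hD : (d.drop i).take (m - i) = d.getD i 0 :: ((d.drop (i+1)).take (m - (i+1))) := by
        rw [List.drop_eq_getElem_cons hid, show m - i = (m - (i+1)) + 1 by omega,
            List.take_succ_cons, List.getD_eq_getElem d 0 hid]
      have hhead : ((a.drop (i+1)).take (m - (i+1))).headD 0
          = if i+1 < m then a.getD (i+1) 0 else 0 := by
        by_cases h1 : i + 1 < m
        · rw [List.drop_eq_getElem_cons (show i+1 < a.length by omega),
              show m - (i+1) = (m - (i+2)) + 1 by omega, List.take_succ_cons, List.headD_cons,
              if_pos h1, List.getD_eq_getElem a 0 (show i+1 < a.length by omega)]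
        · rw [show m - (i+1) = 0 by omega, if_neg h1]
          rfl
      have hb : (buildB a m).getD (i+1) 0
          = (if i+1 < m then a.getD (i+1) 0 else 0) + (if 1 ≤ i then a.getD (i-1) 0 else 0) := by
        rw [buildB_getD]
        congr 1
        by_cases h2 : 1 ≤ i
        · rw [if_pos (show 2 ≤ i+1 ∧ i+1-2 < m by omega), if_pos h2,
              show i+1-2 = i-1 by omega]
        · rw [if_neg (by omega), if_neg h2]
      rw [sweep]
      simp only [hlt, dif_pos]
      rw [hA, hD, hb]
      simp only [keepRec, hhead]
      have hrec : sweep a d (buildB a m) m (i+1)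
          = keepRec (a.getD i 0) ((a.drop (i+1)).take (m - (i+1)))
              ((d.drop (i+1)).take (m - (i+1))) := by
        have := ih (i+1) (by omega) (by omega)
        rwa [if_pos (show 1 ≤ i+1 by omega), show i+1-1 = i by omega] at this
      by_cases hc : (if i+1 < m then a.getD (i+1) 0 else 0) + (if 1 ≤ i then a.getD (i-1) 0 else 0)
          ≤ d.getD i 0
      · rw [if_pos hc, if_pos (by omega : (if 1 ≤ i then a.getD (i-1) 0 else 0) + (if i+1 < m then a.getD (i+1) 0 else 0) ≤ d.getD i 0), hrec]
      · rw [if_neg hc, if_neg (by omega : ¬ ((if 1 ≤ i then a.getD (i-1) 0 else 0) + (if i+1 < m then a.getD (i+1) 0 else 0) ≤ d.getD i 0)), hrec]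
    · rw [sweep]
      simp [hlt, show m - i = 0 by omega, keepRec]

lemma altKept_spec (a d : List Int) :
    (altKept a d).map (fun q => q.1) = keepRec 0 a d := altKept_eq_keepRec a d 0

lemma outerA_eq : ∀ (r : Nat) (a d : List Int) (m : Nat) (c : List Int),
    m ≤ a.length → m ≤ d.length →
    outerA r c.length a d m (c ++ List.replicate r (0:Int))
      = c ++ altLoop r (a.take m) (d.take m)
          ++ List.replicate (r - (altLoop r (a.take m) (d.take m)).length) 0 := by
  intro r
  induction r with
  | zero => intro a d m c _ _; simp [outerA, altLoop]
  | succ r ih =>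
    intro a d m c ha hd
    have hAlen : (a.take m).length = m := List.length_take_of_le ha
    have hswk : sweep a d (buildB a m) m 0 = keepRec 0 (a.take m) (d.take m) := by
      have := sweep_eq_keepRec a d m ha hd m 0 (by omega) (by omega)
      simpa using this
    obtain ⟨h1, h2, h3, h4, h5⟩ :=
      compact_spec (buildB a m) m m 0 0 a d (by omega) (by omega) (by omega) ha hd
    rw [hswk] at h1 h2 h3
    set K := keepRec 0 (a.take m) (d.take m) with hK
    have hKlen : K.length ≤ m := by
      calc K.length ≤ (a.take m).length := keepRec_length_le _ _ _
        _ = m := hAlen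
    have hkmap : (altKept (a.take m) (d.take m)).map (fun q => q.1) = K := altKept_spec _ _
    have hklen : (altKept (a.take m) (d.take m)).length = K.length := by
      rw [← hkmap, List.length_map]
    have hk1 : (altKept (a.take m) (d.take m)).map (fun q => q.1.1) = K.map Prod.fst := by
      rw [← hkmap, List.map_map]; rfl
    have hk2 : (altKept (a.take m) (d.take m)).map (fun q => q.1.2) = K.map Prod.snd := by
      rw [← hkmap, List.map_map]; rfl
    simp only [outerA, altLoop, hklen, hAlen, hk1, hk2, h1, Nat.zero_add]
    by_cases hz : ((m : Int) - (K.length : Int)) = 0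
    · rw [if_pos (by simpa using hz), if_pos (by simpa using hz)]
      simp
    · rw [if_neg (by simpa using hz), if_neg (by simpa using hz)]
      have hres : (c ++ List.replicate (r+1) (0:Int)).set c.length ((m : Int) - (K.length : Int))
          = (c ++ [(m : Int) - (K.length : Int)]) ++ List.replicate r 0 := by
        rw [set_append_len]
        simp [List.replicate_succ]
      have hlen1 : c.length + 1 = (c ++ [(m : Int) - (K.length : Int)]).length := by simp
      rw [hres, hlen1,
          ih (compact a d (buildB a m) m 0 0).1 (compact a d (buildB a m) m 0 0).2.1 K.length
            (c ++ [(m : Int) - (K.length : Int)]) (by omega) (by omega)]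
      have ht1 : (compact a d (buildB a m) m 0 0).1.take K.length = K.map Prod.fst := by
        simpa using h2
      have ht2 : (compact a d (buildB a m) m 0 0).2.1.take K.length = K.map Prod.snd := by
        simpa using h3
      rw [ht1, ht2]
      have hx : (r + 1) - (((m : Int) - (K.length : Int))
            :: altLoop r (K.map Prod.fst) (K.map Prod.snd)).length
          = r - (altLoop r (K.map Prod.fst) (K.map Prod.snd)).length := by
        simp
      rw [hx]
      simp


-- ---------- the index-level reference round ----------
def va (a0 : List Int) (i : Int) : Int := a0.getD i.toNat 0
def vd (d0 : List Int) (i : Int) : Int := d0.getD i.toNat 0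
def ov (a0 : List Int) : Option Int → Int
  | none => 0
  | some p => a0.getD p.toNat 0

def stepI (a0 d0 : List Int) : Int → List Int → List Int
  | _, [] => []
  | pv, i :: rest =>
    if pv + ov a0 rest.head? ≤ vd d0 i then i :: stepI a0 d0 (va a0 i) rest
    else stepI a0 d0 (va a0 i) rest

def refLoop (a0 d0 : List Int) : Nat → List Int → List Int
  | 0, _ => []
  | r + 1, T =>
    let T' := stepI a0 d0 0 T
    let removed : Int := (T.length : Int) - (T'.length : Int)
    if removed = 0 then [] else removed :: refLoop a0 d0 r T'

-- keepRec over value lists is stepI over the index list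
lemma keepRec_map (a0 d0 : List Int) : ∀ (T : List Int) (p : Int),
    keepRec p (T.map (va a0)) (T.map (vd d0))
      = (stepI a0 d0 p T).map (fun i => (va a0 i, vd d0 i)) := by
  intro T
  induction T with
  | nil => intro p; rfl
  | cons i rest ih =>
    intro p
    have hhd : (rest.map (va a0)).headD 0 = ov a0 rest.head? := by
      cases rest <;> rfl
    simp only [List.map_cons, keepRec, stepI, hhd]
    by_cases hc : p + ov a0 rest.head? ≤ vd d0 i
    · rw [if_pos hc, if_pos hc, List.map_cons, ih (va a0 i)]
    · rw [if_neg hc, if_neg hc, ih (va a0 i)]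

lemma altLoop_ref (a0 d0 : List Int) : ∀ (r : Nat) (T : List Int),
    altLoop r (T.map (va a0)) (T.map (vd d0)) = refLoop a0 d0 r T := by
  intro r
  induction r with
  | zero => intro T; rfl
  | succ r ih =>
    intro T
    have hmap : (altKept (T.map (va a0)) (T.map (vd d0))).map (fun q => q.1)
        = (stepI a0 d0 0 T).map (fun i => (va a0 i, vd d0 i)) := by
      rw [altKept_spec, keepRec_map]
    have hlen : (altKept (T.map (va a0)) (T.map (vd d0))).length = (stepI a0 d0 0 T).length := by
      have := congrArg List.length hmap
      simpa using this
    have h1 : (altKept (T.map (va a0)) (T.map (vd d0))).map (fun q => q.1.1)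
        = (stepI a0 d0 0 T).map (va a0) := by
      have := congrArg (List.map Prod.fst) hmap
      rw [List.map_map, List.map_map] at this
      exact this
    have h2 : (altKept (T.map (va a0)) (T.map (vd d0))).map (fun q => q.1.2)
        = (stepI a0 d0 0 T).map (vd d0) := by
      have := congrArg (List.map Prod.snd) hmap
      rw [List.map_map, List.map_map] at this
      exact this
    simp only [altLoop, refLoop, hlen, h1, h2, List.length_map]
    by_cases hz : ((T.length : Int) - ((stepI a0 d0 0 T).length : Int)) = 0
    · rw [if_pos hz, if_pos hz]
    · rw [if_neg hz, if_neg hz, ih]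

-- ---------- predecessor / successor in a chain (sorted index list) ----------
def pioAux : Option Int → List Int → Int → Option Int
  | _, [], _ => none
  | acc, x :: r, i => if x = i then acc else pioAux (some x) r i
def pio (T : List Int) (i : Int) : Option Int := pioAux none T i
def nio : List Int → Int → Option Int
  | [], _ => none
  | x :: r, i => if x = i then r.head? else nio r i

def ChainOK (m : Nat) (C : List Int) : Prop :=
  C.Pairwise (· < ·) ∧ ∀ i ∈ C, 0 ≤ i ∧ i < (m : Int)

def LinkInv (m : Nat) (C : List Int) (pv nx : List Int) : Prop :=
  ∀ i ∈ C, pv.getD i.toNat 0 = (pio C i).getD (-1) ∧ nx.getD i.toNat 0 = (nio C i).getD (m : Int)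

lemma pio_append : ∀ (X Y : List Int) (j : Int) (acc : Option Int), j ∉ X →
    pioAux acc (X ++ j :: Y) j = (X.getLast?).or acc := by
  intro X
  induction X with
  | nil => intro Y j acc _; simp [pioAux]
  | cons u U ih =>
    intro Y j acc hj
    have hu : u ≠ j := by intro h; exact hj (by simp [h])
    have hrec := ih Y j (some u) (fun h => hj (List.mem_cons_of_mem _ h))
    show pioAux acc ((u :: U) ++ j :: Y) j = _
    rw [List.cons_append]
    show (if u = j then acc else pioAux (some u) (U ++ j :: Y) j) = _
    rw [if_neg hu, hrec]
    cases U with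
    | nil => simp
    | cons v V =>
      rw [List.getLast?_cons_cons]
      cases hgl : (v :: V).getLast? with
      | none => simp at hgl
      | some w => rfl

lemma nio_append : ∀ (X Y : List Int) (j : Int), j ∉ X →
    nio (X ++ j :: Y) j = Y.head? := by
  intro X
  induction X with
  | nil => intro Y j _; simp [nio]
  | cons u U ih =>
    intro Y j hj
    have hu : u ≠ j := by intro h; exact hj (by simp [h])
    simp only [List.cons_append, nio, hu, if_false]
    exact ih Y j (fun h => hj (List.mem_cons_of_mem _ h))

lemma split_of_mem (T : List Int) (j : Int) (hT : T.Nodup) (hj : j ∈ T) :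
    ∃ U V, T = U ++ j :: V ∧ j ∉ U ∧ j ∉ V := by
  obtain ⟨U, V, h⟩ := List.append_of_mem hj
  subst h
  have h2 := hT
  simp only [List.nodup_append, List.nodup_cons] at h2
  exact ⟨U, V, rfl, fun h => h2.2.2 j h j (by simp) rfl, h2.2.1.1⟩

lemma pio_split (U V : List Int) (j : Int) (hj : j ∉ U) :
    pio (U ++ j :: V) j = U.getLast? := by
  rw [pio, pio_append U V j none hj, Option.or_none]

lemma pio_mem (T : List Int) (j z : Int) (hT : T.Nodup) (hj : j ∈ T)
    (h : pio T j = some z) : z ∈ T := by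
  obtain ⟨U, V, rfl, hU, _⟩ := split_of_mem T j hT hj
  rw [pio_split U V j hU] at h
  exact List.mem_append_left _ (List.mem_of_getLast? h)

lemma nio_mem_of (T : List Int) (j z : Int) (hT : T.Nodup) (hj : j ∈ T)
    (h : nio T j = some z) : z ∈ T := by
  obtain ⟨U, V, rfl, hU, _⟩ := split_of_mem T j hT hj
  rw [nio_append U V j hU] at h
  cases V with
  | nil => simp at h
  | cons v V' =>
    simp at h
    subst h
    exact List.mem_append_right _ (by simp)

lemma pio_nio_pair (T : List Int) (j x : Int) (hT : T.Nodup)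
    (hj : j ∈ T) (hx : x ∈ T) : pio T j = some x ↔ nio T x = some j := by
  constructor
  · intro h
    obtain ⟨U, V, rfl, hU, hV⟩ := split_of_mem T j hT hj
    rw [pio_split U V j hU] at h
    obtain ⟨U', rfl⟩ : ∃ U', U = U' ++ [x] := by
      have hne : U ≠ [] := by rintro rfl; simp at h
      refine ⟨U.dropLast, ?_⟩
      have h1 : U.getLast hne = x := by
        rw [List.getLast?_eq_some_getLast (h := hne)] at h
        exact Option.some_inj.mp h
      rw [← h1]
      exact (List.dropLast_concat_getLast hne).symm
    have hnodU : (U' ++ [x]).Nodup := (List.nodup_append.mp hT).1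
    have hxU' : x ∉ U' := fun hmem =>
      (List.disjoint_of_nodup_append hnodU) hmem (by simp)
    have heq : U' ++ [x] ++ j :: V = U' ++ x :: (j :: V) := by simp
    rw [heq, nio_append U' (j :: V) x hxU']
    rfl
  · intro h
    obtain ⟨X, Y, rfl, hX, hY⟩ := split_of_mem T x hT hx
    rw [nio_append X Y x hX] at h
    cases Y with
    | nil => simp at h
    | cons y Y' =>
      obtain rfl : y = j := by simpa using h
      have hjn : y ∉ X ++ [x] := by
        intro hmem
        rcases List.mem_append.mp hmem with hh | hh
        · exact (List.disjoint_of_nodup_append hT) hh (by simp)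
        · have hxy : y = x := by simpa using hh
          have h2 : (x :: y :: Y').Nodup := (List.nodup_append.mp hT).2.1
          rw [List.nodup_cons] at h2
          exact h2.1 (by simp [hxy])
      have heq : X ++ x :: y :: Y' = (X ++ [x]) ++ y :: Y' := by simp
      rw [heq, pio_split (X ++ [x]) Y' y hjn]
      simp

lemma filter_keep (U V : List Int) (j x : Int) (hjx : j ≠ x) :
    (U ++ j :: V).filter (· ≠ x) = U.filter (· ≠ x) ++ j :: V.filter (· ≠ x) := by
  rw [List.filter_append, List.filter_cons, if_pos (by simpa using hjx)]

lemma filter_ne_eq_self (L : List Int) (x : Int) (hx : x ∉ L) : L.filter (· ≠ x) = L :=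
  List.filter_eq_self.mpr (fun a ha => by simp; intro h; exact hx (h ▸ ha))

lemma getLast?_filter_ne (U : List Int) (w x : Int) (h : U.getLast? = some w) (hwx : w ≠ x) :
    (U.filter (· ≠ x)).getLast? = some w := by
  have hne : U ≠ [] := by rintro rfl; simp at h
  have h1 : U.getLast hne = w := by
    rw [List.getLast?_eq_some_getLast (h := hne)] at h
    exact Option.some_inj.mp h
  have h2 : U = U.dropLast ++ [w] := by rw [← h1]; exact (List.dropLast_concat_getLast hne).symm
  rw [h2, List.filter_append, List.filter_cons, if_pos (by simpa using hwx)]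
  simp

lemma filter_del (X Y : List Int) (x : Int) (hX : x ∉ X) (hY : x ∉ Y) :
    (X ++ x :: Y).filter (· ≠ x) = X ++ Y := by
  rw [List.filter_append, List.filter_cons, if_neg (by simp)]
  rw [filter_ne_eq_self X x hX, filter_ne_eq_self Y x hY]

lemma getLast?_filter_true (U : List Int) (p : Int) (f : Int → Bool)
    (h : U.getLast? = some p) (hfp : f p = true) : (U.filter f).getLast? = some p := by
  have hne : U ≠ [] := by rintro rfl; simp at h
  have h1 : U.getLast hne = p := by
    rw [List.getLast?_eq_some_getLast (h := hne)] at h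
    exact Option.some_inj.mp h
  have h2 : U = U.dropLast ++ [p] := by rw [← h1]; exact (List.dropLast_concat_getLast hne).symm
  rw [h2, List.filter_append, List.filter_cons, if_pos hfp]
  simp

lemma pio_del_eq (T : List Int) (x j : Int) (hT : T.Nodup) (hj : j ∈ T) (hjx : j ≠ x)
    (h : pio T j ≠ some x) : pio (T.filter (· ≠ x)) j = pio T j := by
  obtain ⟨U, V, rfl, hU, hV⟩ := split_of_mem T j hT hj
  rw [pio_split U V j hU, filter_keep U V j x hjx,
      pio_split _ _ j (fun hm => hU (List.mem_of_mem_filter hm))]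
  by_cases hxU : x ∈ U
  · have hne : U ≠ [] := by rintro rfl; simp at hxU
    cases hlast : U.getLast? with
    | none => exact absurd (List.getLast?_eq_none_iff.mp hlast) hne
    | some w =>
      rw [pio_split U V j hU] at h
      rw [hlast] at h
      exact getLast?_filter_ne U w x hlast (fun hwx => h (by rw [hwx]))
  · rw [filter_ne_eq_self U x hxU]

lemma nio_del_eq (T : List Int) (x j : Int) (hT : T.Nodup) (hj : j ∈ T) (hjx : j ≠ x)
    (h : nio T j ≠ some x) : nio (T.filter (· ≠ x)) j = nio T j := by
  obtain ⟨U, V, rfl, hU, hV⟩ := split_of_mem T j hT hj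
  rw [nio_append U V j hU, filter_keep U V j x hjx,
      nio_append _ _ j (fun hm => hU (List.mem_of_mem_filter hm))]
  cases V with
  | nil => simp
  | cons v V' =>
    rw [nio_append U (v :: V') j hU] at h
    have hvx : v ≠ x := by intro hh; exact h (by simp [hh])
    rw [List.filter_cons, if_pos (by simpa using hvx)]
    simp

lemma pio_del_hit (T : List Int) (x j : Int) (hT : T.Nodup) (hx : x ∈ T)
    (h : nio T x = some j) : pio (T.filter (· ≠ x)) j = pio T x := by
  obtain ⟨X, Y, rfl, hX, hY⟩ := split_of_mem T x hT hx
  rw [nio_append X Y x hX] at h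
  cases Y with
  | nil => simp at h
  | cons y Y' =>
    obtain rfl : y = j := by simpa using h
    rw [pio_split X (y :: Y') x hX, filter_del X (y :: Y') x hX hY,
        pio_split X Y' y (fun hm => (List.disjoint_of_nodup_append hT) hm (by simp))]

lemma nio_del_hit (T : List Int) (x j : Int) (hT : T.Nodup) (hx : x ∈ T)
    (h : pio T x = some j) : nio (T.filter (· ≠ x)) j = nio T x := by
  obtain ⟨X, Y, rfl, hX, hY⟩ := split_of_mem T x hT hx
  rw [pio_split X Y x hX] at h
  have hne : X ≠ [] := by rintro rfl; simp at h
  have h1 : X.getLast hne = j := by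
    rw [List.getLast?_eq_some_getLast (h := hne)] at h
    exact Option.some_inj.mp h
  have h2 : X = X.dropLast ++ [j] := by rw [← h1]; exact (List.dropLast_concat_getLast hne).symm
  rw [nio_append X Y x hX, filter_del X Y x hX hY, h2]
  have hjd : j ∉ X.dropLast := by
    have hn : X.Nodup := List.Nodup.of_append_left hT
    rw [h2] at hn
    exact fun hm => (List.disjoint_of_nodup_append hn) hm (by simp)
  rw [List.append_assoc, List.singleton_append, nio_append X.dropLast Y j hjd]

lemma pio_filter_stable (T : List Int) (f : Int → Bool) (j : Int)
    (hT : T.Nodup) (hj : j ∈ T) (hfj : f j = true) :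
    ((pio T j = none → pio (T.filter f) j = none) ∧
     (∀ p, pio T j = some p → f p = true → pio (T.filter f) j = some p)) := by
  obtain ⟨U, V, rfl, hU, hV⟩ := split_of_mem T j hT hj
  have hflt : (U ++ j :: V).filter f = U.filter f ++ j :: V.filter f := by
    rw [List.filter_append, List.filter_cons, if_pos hfj]
  rw [pio_split U V j hU, hflt,
      pio_split _ _ j (fun hm => hU (List.mem_of_mem_filter hm))]
  constructor
  · intro h
    obtain rfl : U = [] := List.getLast?_eq_none_iff.mp h
    simp
  · intro p h hfp
    exact getLast?_filter_true U p f h hfp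

lemma nio_filter_stable (T : List Int) (f : Int → Bool) (j : Int)
    (hT : T.Nodup) (hj : j ∈ T) (hfj : f j = true) :
    ((nio T j = none → nio (T.filter f) j = none) ∧
     (∀ q, nio T j = some q → f q = true → nio (T.filter f) j = some q)) := by
  obtain ⟨U, V, rfl, hU, hV⟩ := split_of_mem T j hT hj
  have hflt : (U ++ j :: V).filter f = U.filter f ++ j :: V.filter f := by
    rw [List.filter_append, List.filter_cons, if_pos hfj]
  rw [nio_append U V j hU, hflt,
      nio_append _ _ j (fun hm => hU (List.mem_of_mem_filter hm))]
  constructor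
  · intro h
    obtain rfl : V = [] := by cases V with | nil => rfl | cons v V' => simp at h
    simp
  · intro q h hfq
    cases V with
    | nil => simp at h
    | cons v V' =>
      obtain rfl : v = q := by simpa using h
      rw [List.filter_cons, if_pos hfq]
      simp

lemma pairwise_lt_nodup (l : List Int) (h : l.Pairwise (· < ·)) : l.Nodup :=
  h.imp (fun hab => ne_of_lt hab)

lemma sorted_mem_ext : ∀ (l₁ l₂ : List Int), l₁.Pairwise (· < ·) → l₂.Pairwise (· < ·) →
    (∀ x, x ∈ l₁ ↔ x ∈ l₂) → l₁ = l₂ := by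
  intro l₁
  induction l₁ with
  | nil =>
    intro l₂ _ _ hmem
    cases l₂ with
    | nil => rfl
    | cons y t => exact absurd ((hmem y).mpr (by simp)) (by simp)
  | cons x t ih =>
    intro l₂ h₁ h₂ hmem
    cases l₂ with
    | nil => exact absurd ((hmem x).mp (by simp)) (by simp)
    | cons y s =>
      have hxy : x = y := by
        have hx2 : x ∈ y :: s := (hmem x).mp (by simp)
        have hy1 : y ∈ x :: t := (hmem y).mpr (by simp)
        rcases List.mem_cons.mp hx2 with h | h
        · exact h
        · rcases List.mem_cons.mp hy1 with h' | h'
          · exact h'.symm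
          · have h1 : y < x := (List.pairwise_cons.mp h₂).1 x h
            have h2 : x < y := (List.pairwise_cons.mp h₁).1 y h'
            omega
      subst hxy
      have htT : t = s := by
        apply ih s (List.pairwise_cons.mp h₁).2 (List.pairwise_cons.mp h₂).2
        intro z
        constructor
        · intro hz
          have : z ∈ x :: s := (hmem z).mp (List.mem_cons_of_mem _ hz)
          rcases List.mem_cons.mp this with h | h
          · subst h
            exact absurd hz (by
              have := pairwise_lt_nodup _ h₁
              rw [List.nodup_cons] at this
              exact this.1)
          · exact h
        · intro hz
          have : z ∈ x :: t := (hmem z).mpr (List.mem_cons_of_mem _ hz)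
          rcases List.mem_cons.mp this with h | h
          · subst h
            exact absurd hz (by
              have := pairwise_lt_nodup _ h₂
              rw [List.nodup_cons] at this
              exact this.1)
          · exact h
      rw [htT]

lemma stepI_filter (a0 d0 : List Int) : ∀ (T : List Int) (acc : Option Int), T.Nodup →
    stepI a0 d0 (ov a0 acc) T
      = T.filter (fun i => decide (ov a0 (pioAux acc T i) + ov a0 (nio T i) ≤ vd d0 i)) := by
  intro T
  induction T with
  | nil => intro acc _; rfl
  | cons x r ih =>
    intro acc hnd
    rw [List.nodup_cons] at hnd
    have hx : pioAux acc (x :: r) x = acc := by simp [pioAux]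
    have hnx : nio (x :: r) x = r.head? := by simp [nio]
    rw [stepI, List.filter_cons]
    have hcond : (decide (ov a0 (pioAux acc (x :: r) x) + ov a0 (nio (x :: r) x) ≤ vd d0 x))
        = decide (ov a0 acc + ov a0 r.head? ≤ vd d0 x) := by rw [hx, hnx]
    rw [hcond]
    have htl : stepI a0 d0 (va a0 x) r
        = r.filter (fun i => decide (ov a0 (pioAux acc (x :: r) i) + ov a0 (nio (x :: r) i) ≤ vd d0 i)) := by
      have h1 : stepI a0 d0 (va a0 x) r = stepI a0 d0 (ov a0 (some x)) r := rfl
      rw [h1, ih (some x) hnd.2]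
      apply List.filter_congr
      intro i hi
      have hix : i ≠ x := fun h => hnd.1 (h ▸ hi)
      have e1 : pioAux acc (x :: r) i = pioAux (some x) r i := by
        simp [pioAux, Ne.symm hix]
      have e2 : nio (x :: r) i = nio r i := by
        simp [nio, Ne.symm hix]
      rw [e1, e2]
    rw [htl]
    by_cases hc : ov a0 acc + ov a0 r.head? ≤ vd d0 x
    · rw [if_pos hc, if_pos (by simpa using hc)]
    · rw [if_neg hc, if_neg (by simpa using hc)]

-- ---------- the splice fold ----------
lemma splice_one (m : Nat) (C pv nx : List Int) (x : Int)
    (hC : ChainOK m C) (hL : LinkInv m C pv nx) (hx : x ∈ C)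
    (hpl : pv.length = m) (hnl : nx.length = m) :
    LinkInv m (C.filter (· ≠ x)) (spliceStep m (pv, nx) x).1 (spliceStep m (pv, nx) x).2 ∧
    (spliceStep m (pv, nx) x).1.length = m ∧
    (spliceStep m (pv, nx) x).2.length = m ∧
    (∀ z : Int, 0 ≤ z → z < (m : Int) → z ∉ C →
      (spliceStep m (pv, nx) x).1.getD z.toNat 0 = pv.getD z.toNat 0 ∧
      (spliceStep m (pv, nx) x).2.getD z.toNat 0 = nx.getD z.toNat 0) := by
  have hnd : C.Nodup := pairwise_lt_nodup C hC.1
  obtain ⟨hpx, hqx⟩ := hL x hx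
  have hxb := hC.2 x hx
  -- the two written cells
  have hone : spliceStep m (pv, nx) x
      = (if nx.getD x.toNat 0 < (m : Int) then pv.set (nx.getD x.toNat 0).toNat (pv.getD x.toNat 0) else pv,
         if 0 ≤ pv.getD x.toNat 0 then nx.set (pv.getD x.toNat 0).toNat (nx.getD x.toNat 0) else nx) := rfl
  rw [hone]
  have htoNat : ∀ u v : Int, 0 ≤ u → 0 ≤ v → u ≠ v → u.toNat ≠ v.toNat := by
    intro u v hu hv huv h; exact huv (by omega)
  have hpv1 : ∀ j ∈ C.filter (· ≠ x),
      (if nx.getD x.toNat 0 < (m : Int) then pv.set (nx.getD x.toNat 0).toNat (pv.getD x.toNat 0) else pv).getD j.toNat 0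
        = (pio (C.filter (· ≠ x)) j).getD (-1) := by
    intro j hj
    have hjC : j ∈ C := List.mem_of_mem_filter hj
    have hjx : j ≠ x := by have := List.of_mem_filter hj; simpa using this
    have hjb := hC.2 j hjC
    cases hq : nio C x with
    | none =>
      rw [if_neg (by rw [hqx, hq]; simp)]
      rw [(hL j hjC).1, pio_del_eq C x j hnd hjC hjx]
      intro hcon
      have h2 := (pio_nio_pair C j x hnd hjC hx).mp hcon
      rw [hq] at h2; cases h2
    | some q0 =>
      have hq0C : q0 ∈ C := nio_mem_of C x q0 hnd hx hq
      have hq0b := hC.2 q0 hq0C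
      rw [hqx, hq]
      rw [if_pos (by simpa using hq0b.2)]
      by_cases hjq : j = q0
      · subst hjq
        rw [getD_set_ite]
        rw [if_pos ⟨rfl, by simp; omega⟩]
        rw [pio_del_hit C x j hnd hx hq, hpx]
      · rw [getD_set_ite, if_neg (by
          intro hcc
          exact (htoNat q0 j hq0b.1 hjb.1 (fun h => hjq h.symm)) hcc.1)]
        rw [(hL j hjC).1, pio_del_eq C x j hnd hjC hjx]
        intro hcon
        have h2 := (pio_nio_pair C j x hnd hjC hx).mp hcon
        rw [hq] at h2
        exact hjq (by simpa using h2.symm)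
  have hnx1 : ∀ j ∈ C.filter (· ≠ x),
      (if 0 ≤ pv.getD x.toNat 0 then nx.set (pv.getD x.toNat 0).toNat (nx.getD x.toNat 0) else nx).getD j.toNat 0
        = (nio (C.filter (· ≠ x)) j).getD (m : Int) := by
    intro j hj
    have hjC : j ∈ C := List.mem_of_mem_filter hj
    have hjx : j ≠ x := by have := List.of_mem_filter hj; simpa using this
    have hjb := hC.2 j hjC
    cases hp : pio C x with
    | none =>
      rw [if_neg (by rw [hpx, hp]; simp)]
      rw [(hL j hjC).2, nio_del_eq C x j hnd hjC hjx]
      intro hcon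
      have h2 := (pio_nio_pair C x j hnd hx hjC).mpr hcon
      rw [hp] at h2; cases h2
    | some p0 =>
      have hp0C : p0 ∈ C := pio_mem C x p0 hnd hx hp
      have hp0b := hC.2 p0 hp0C
      rw [hpx, hp]
      rw [if_pos (by simpa using hp0b.1)]
      by_cases hjp : j = p0
      · subst hjp
        rw [getD_set_ite]
        rw [if_pos ⟨rfl, by simp; omega⟩]
        rw [nio_del_hit C x j hnd hx hp, hqx]
      · rw [getD_set_ite, if_neg (by
          intro hcc
          exact (htoNat p0 j hp0b.1 hjb.1 (fun h => hjp h.symm)) hcc.1)]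
        rw [(hL j hjC).2, nio_del_eq C x j hnd hjC hjx]
        intro hcon
        have h2 := (pio_nio_pair C x j hnd hx hjC).mpr hcon
        rw [hp] at h2
        exact hjp (by simpa using h2.symm)
  have hlen1 : (if nx.getD x.toNat 0 < (m : Int) then pv.set (nx.getD x.toNat 0).toNat (pv.getD x.toNat 0) else pv).length = m := by
    split <;> simp [hpl]
  have hlen2 : (if 0 ≤ pv.getD x.toNat 0 then nx.set (pv.getD x.toNat 0).toNat (nx.getD x.toNat 0) else nx).length = m := by
    split <;> simp [hnl]
  refine ⟨fun j hj => ⟨hpv1 j hj, hnx1 j hj⟩, hlen1, hlen2, ?_⟩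
  · intro z hz0 hzm hzC
    constructor
    · show (if nx.getD x.toNat 0 < (m : Int) then pv.set (nx.getD x.toNat 0).toNat (pv.getD x.toNat 0) else pv).getD z.toNat 0 = pv.getD z.toNat 0
      split
      case isTrue hlt =>
        cases hq : nio C x with
        | none => rw [hqx, hq] at hlt; simp at hlt
        | some q0 =>
          have hq0C : q0 ∈ C := nio_mem_of C x q0 hnd hx hq
          rw [getD_set_ite, if_neg ?_]
          intro hcc
          rw [hqx, hq] at hcc
          exact (htoNat q0 z (hC.2 q0 hq0C).1 hz0 (fun h => hzC (h ▸ hq0C))) hcc.1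
      case isFalse => rfl
    · show (if 0 ≤ pv.getD x.toNat 0 then nx.set (pv.getD x.toNat 0).toNat (nx.getD x.toNat 0) else nx).getD z.toNat 0 = nx.getD z.toNat 0
      split
      case isTrue hle =>
        cases hp : pio C x with
        | none => rw [hpx, hp] at hle; simp at hle
        | some p0 =>
          have hp0C : p0 ∈ C := pio_mem C x p0 hnd hx hp
          rw [getD_set_ite, if_neg ?_]
          intro hcc
          rw [hpx, hp] at hcc
          exact (htoNat p0 z (hC.2 p0 hp0C).1 hz0 (fun h => hzC (h ▸ hp0C))) hcc.1
      case isFalse => rfl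

lemma chainOK_filter (m : Nat) (C : List Int) (f : Int → Bool) (h : ChainOK m C) :
    ChainOK m (C.filter f) :=
  ⟨h.1.filter f, fun i hi => h.2 i (List.mem_of_mem_filter hi)⟩

lemma filter_not_contains_cons (C D : List Int) (x : Int) :
    (C.filter (· ≠ x)).filter (fun j => !(D.contains j))
      = C.filter (fun j => !((x :: D).contains j)) := by
  rw [List.filter_filter]
  apply List.filter_congr
  intro a _
  by_cases hax : a = x <;> cases hD : D.contains a <;>
    simp [List.contains_cons, hax, hD] <;> simpa using hD

lemma splice_fold (m : Nat) : ∀ (D C pv nx : List Int),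
    ChainOK m C → LinkInv m C pv nx → D.Nodup → (∀ i ∈ D, i ∈ C) →
    pv.length = m → nx.length = m →
    LinkInv m (C.filter (fun j => !(D.contains j))) (D.foldl (spliceStep m) (pv, nx)).1
      (D.foldl (spliceStep m) (pv, nx)).2 ∧
    (D.foldl (spliceStep m) (pv, nx)).1.length = m ∧
    (D.foldl (spliceStep m) (pv, nx)).2.length = m ∧
    (∀ z : Int, 0 ≤ z → z < (m : Int) → z ∉ C →
      (D.foldl (spliceStep m) (pv, nx)).1.getD z.toNat 0 = pv.getD z.toNat 0 ∧
      (D.foldl (spliceStep m) (pv, nx)).2.getD z.toNat 0 = nx.getD z.toNat 0) ∧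
    (∀ j ∈ C, j ∉ D →
      (∀ y, pio C j = some y → y ∈ D →
        ∃ i ∈ D, (D.foldl (spliceStep m) (pv, nx)).2.getD i.toNat 0 = j) ∧
      (∀ y, nio C j = some y → y ∈ D →
        ∃ i ∈ D, (D.foldl (spliceStep m) (pv, nx)).1.getD i.toNat 0 = j)) := by
  intro D
  induction D with
  | nil =>
    intro C pv nx hC hL _ _ hpl hnl
    refine ⟨?_, hpl, hnl, fun z _ _ _ => ⟨rfl, rfl⟩, ?_⟩
    · have : C.filter (fun j => !([] : List Int).contains j) = C :=
        List.filter_eq_self.mpr (fun a _ => by simp)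
      rw [List.foldl_nil, this]; exact hL
    · intro j _ _
      exact ⟨fun y _ hy => absurd hy (by simp), fun y _ hy => absurd hy (by simp)⟩
  | cons x D ih =>
    intro C pv nx hC hL hnd hsub hpl hnl
    have hnd' : C.Nodup := pairwise_lt_nodup C hC.1
    have hxC : x ∈ C := hsub x (by simp)
    rw [List.nodup_cons] at hnd
    obtain ⟨hL1, hpl1, hnl1, hout1⟩ := splice_one m C pv nx x hC hL hxC hpl hnl
    set st1 := spliceStep m (pv, nx) x with hst1
    have hC1 : ChainOK m (C.filter (· ≠ x)) := chainOK_filter m C _ hC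
    have hsub1 : ∀ i ∈ D, i ∈ C.filter (· ≠ x) := by
      intro i hi
      exact List.mem_filter.mpr ⟨hsub i (List.mem_cons_of_mem _ hi),
        by simp; intro h; exact hnd.1 (h ▸ hi)⟩
    have hfold : (x :: D).foldl (spliceStep m) (pv, nx) = D.foldl (spliceStep m) st1 := by
      rw [List.foldl_cons]
    obtain ⟨ihL, ihpl, ihnl, ihout, ihev⟩ :=
      ih (C.filter (· ≠ x)) st1.1 st1.2 hC1 hL1 hnd.2 hsub1 hpl1 hnl1
    have hff := filter_not_contains_cons C D x
    rw [hfold]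
    have hfoldD : D.foldl (spliceStep m) st1 = D.foldl (spliceStep m) (st1.1, st1.2) := by
      rw [Prod.mk.eta]
    rw [hfoldD]
    refine ⟨by rw [← hff]; exact ihL, ihpl, ihnl, ?_, ?_⟩
    · intro z hz0 hzm hzC
      have hzC1 : z ∉ C.filter (· ≠ x) := fun h => hzC (List.mem_of_mem_filter h)
      obtain ⟨e1, e2⟩ := ihout z hz0 hzm hzC1
      obtain ⟨f1, f2⟩ := hout1 z hz0 hzm hzC
      exact ⟨e1.trans f1, e2.trans f2⟩
    · intro j hjC hjD
      have hjx : j ≠ x := fun h => hjD (by simp [h])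
      have hjD' : j ∉ D := fun h => hjD (List.mem_cons_of_mem _ h)
      have hjC1 : j ∈ C.filter (· ≠ x) := List.mem_filter.mpr ⟨hjC, by simpa using hjx⟩
      have hjb := hC.2 j hjC
      constructor
      · intro y hy hyD
        rcases List.mem_cons.mp hyD with rfl | hyD'
        · -- x itself was j's predecessor: the cell x keeps nxt[x] = j
          have hnioxj : nio C y = some j := (pio_nio_pair C j y hnd' hjC hxC).mp hy
          have hyb := hC.2 y hxC
          have hcell : st1.2.getD y.toNat 0 = j := by
            have hwr : st1.2 = if 0 ≤ pv.getD y.toNat 0 then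
                nx.set (pv.getD y.toNat 0).toNat (nx.getD y.toNat 0) else nx := rfl
            have hqx := (hL y hxC).2
            rw [hwr]
            split
            case isTrue hp0 =>
              cases hp : pio C y with
              | none => rw [(hL y hxC).1, hp] at hp0; simp at hp0
              | some p0 =>
                have hp0C : p0 ∈ C := pio_mem C y p0 hnd' hxC hp
                have hp0ny : p0 ≠ y := by
                  intro h
                  have := (pio_nio_pair C y p0 hnd' hxC hp0C).mp hp
                  rw [h, hnioxj] at this
                  exact hjx (by simpa using this)
                have hp2 : pv.getD y.toNat 0 = p0 := by rw [(hL y hxC).1, hp]; rfl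
                have hne2 : (pv.getD y.toNat 0).toNat ≠ y.toNat := by
                  rw [hp2]
                  intro hh
                  exact hp0ny (by have := (hC.2 p0 hp0C).1; omega)
                rw [getD_set_ne _ _ _ _ hne2, hqx, hnioxj]; rfl
            case isFalse => rw [hqx, hnioxj]; rfl
          have hxC1 : y ∉ C.filter (· ≠ y) := fun h =>
            absurd (List.of_mem_filter h) (by simp)
          obtain ⟨_, e2⟩ := ihout y hyb.1 hyb.2 hxC1
          exact ⟨y, by simp, by rw [e2]; exact hcell⟩
        · -- predecessor deeper in D: use the IH on the shrunken chain
          have hpio1 : pio (C.filter (· ≠ x)) j = some y := by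
            rw [pio_del_eq C x j hnd' hjC hjx]
            · exact hy
            · rw [hy]
              intro hcon
              exact hnd.1 (by
                have : y = x := by simpa using hcon
                exact this ▸ hyD')
          obtain ⟨i, hiD, hival⟩ := (ihev j hjC1 hjD').1 y hpio1 hyD'
          exact ⟨i, List.mem_cons_of_mem _ hiD, hival⟩
      · intro y hy hyD
        rcases List.mem_cons.mp hyD with rfl | hyD'
        · have hpioxj : pio C y = some j := (pio_nio_pair C y j hnd' hxC hjC).mpr hy
          have hyb := hC.2 y hxC
          have hcell : st1.1.getD y.toNat 0 = j := by
            have hwr : st1.1 = if nx.getD y.toNat 0 < (m : Int) then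
                pv.set (nx.getD y.toNat 0).toNat (pv.getD y.toNat 0) else pv := rfl
            have hpx := (hL y hxC).1
            rw [hwr]
            split
            case isTrue hq0 =>
              cases hq : nio C y with
              | none => rw [(hL y hxC).2, hq] at hq0; simp at hq0
              | some q0 =>
                have hq0C : q0 ∈ C := nio_mem_of C y q0 hnd' hxC hq
                have hq0ny : q0 ≠ y := by
                  intro h
                  have := (pio_nio_pair C q0 y hnd' hq0C hxC).mpr hq
                  rw [h, hpioxj] at this
                  exact hjx (by simpa using this)
                have hq2 : nx.getD y.toNat 0 = q0 := by rw [(hL y hxC).2, hq]; rfl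
                have hne2 : (nx.getD y.toNat 0).toNat ≠ y.toNat := by
                  rw [hq2]
                  intro hh
                  exact hq0ny (by have := (hC.2 q0 hq0C).1; omega)
                rw [getD_set_ne _ _ _ _ hne2, hpx, hpioxj]; rfl
            case isFalse => rw [hpx, hpioxj]; rfl
          have hxC1 : y ∉ C.filter (· ≠ y) := fun h =>
            absurd (List.of_mem_filter h) (by simp)
          obtain ⟨e1, _⟩ := ihout y hyb.1 hyb.2 hxC1
          exact ⟨y, by simp, by rw [e1]; exact hcell⟩
        · have hnio1 : nio (C.filter (· ≠ x)) j = some y := by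
            rw [nio_del_eq C x j hnd' hjC hjx]
            · exact hy
            · rw [hy]
              intro hcon
              exact hnd.1 (by
                have : y = x := by simpa using hcon
                exact this ▸ hyD')
          obtain ⟨i, hiD, hival⟩ := (ihev j hjC1 hjD').2 y hnio1 hyD'
          exact ⟨i, List.mem_cons_of_mem _ hiD, hival⟩

-- ---------- alive marking ----------
lemma getD_set_ite_bool (l : List Bool) (i j : Nat) (v : Bool) :
    (l.set i v).getD j false = if i = j ∧ i < l.length then v else l.getD j false := by
  simp [List.getD, List.getElem?_set]; split
  · split <;> simp_all
  · simp_all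

lemma mark_fold (m : Nat) : ∀ (D : List Int) (alive : List Bool),
    alive.length = m → (∀ i ∈ D, 0 ≤ i ∧ i < (m : Int)) →
    (D.foldl (fun al i => al.set i.toNat false) alive).length = m ∧
    (∀ j : Nat, j < m →
      (D.foldl (fun al i => al.set i.toNat false) alive).getD j false
        = (alive.getD j false && !(D.contains (j : Int)))) := by
  intro D
  induction D with
  | nil => intro alive hl _; exact ⟨hl, fun j _ => by simp⟩
  | cons i D ih =>
    intro alive hl hb
    have hib := hb i (by simp)
    obtain ⟨hlen', hch⟩ := ih (alive.set i.toNat false) (by simpa using hl)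
      (fun x hx => hb x (List.mem_cons_of_mem _ hx))
    refine ⟨hlen', fun j hj => ?_⟩
    rw [List.foldl_cons, hch j hj, getD_set_ite_bool]
    by_cases hij : i = (j : Int)
    · rw [if_pos ⟨by omega, by omega⟩]
      have : (i :: D).contains (j : Int) = true := by simp [hij]
      rw [this]
      simp
    · have hijn : ¬ (i.toNat = j ∧ i.toNat < alive.length) := by
        intro ⟨h1, _⟩
        exact hij (by omega)
      rw [if_neg hijn]
      have : (i :: D).contains (j : Int) = D.contains (j : Int) := by
        simp [List.contains_cons]
        intro h
        exact absurd h.symm hij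
      rw [this]

-- ---------- the candidate set ----------
lemma mem_candAdd (m : Nat) (alive : List Bool) (pv nx : List Int)
    (s : PySem.Set Int) (i x : Int) (h : x ∈ candAdd m alive pv nx s i) :
    x ∈ s ∨ (0 ≤ x ∧ x < (m : Int) ∧ alive.getD x.toNat false = true) := by
  unfold candAdd at h
  dsimp only at h
  split at h
  case isTrue hq =>
    rcases (PySem.Set.mem_add _ _ _).mp h with h1 | h1
    · split at h1
      case isTrue hp =>
        rcases (PySem.Set.mem_add _ _ _).mp h1 with h2 | h2
        · exact Or.inl h2
        · exact Or.inr (h2 ▸ hp)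
      case isFalse => exact Or.inl h1
    · exact Or.inr (h1 ▸ hq)
  case isFalse =>
    split at h
    case isTrue hp =>
      rcases (PySem.Set.mem_add _ _ _).mp h with h2 | h2
      · exact Or.inl h2
      · exact Or.inr (h2 ▸ hp)
    case isFalse => exact Or.inl h

lemma mem_candAdd_of_mem (m : Nat) (alive : List Bool) (pv nx : List Int)
    (s : PySem.Set Int) (i x : Int) (h : x ∈ s) : x ∈ candAdd m alive pv nx s i := by
  unfold candAdd
  dsimp only
  split
  · exact (PySem.Set.mem_add _ _ _).mpr (Or.inl (by
      split
      · exact (PySem.Set.mem_add _ _ _).mpr (Or.inl h)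
      · exact h))
  · split
    · exact (PySem.Set.mem_add _ _ _).mpr (Or.inl h)
    · exact h

lemma cand_fold_mono (m : Nat) (alive : List Bool) (pv nx : List Int) :
    ∀ (D : List Int) (s : PySem.Set Int) (x : Int),
    x ∈ s → x ∈ D.foldl (candAdd m alive pv nx) s := by
  intro D
  induction D with
  | nil => intro s x h; exact h
  | cons i D ih =>
    intro s x h
    exact ih _ x (mem_candAdd_of_mem m alive pv nx s i x h)

lemma cand_fold_mem (m : Nat) (alive : List Bool) (pv nx : List Int) :
    ∀ (D : List Int) (s : PySem.Set Int) (x : Int),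
    x ∈ D.foldl (candAdd m alive pv nx) s →
    x ∈ s ∨ (0 ≤ x ∧ x < (m : Int) ∧ alive.getD x.toNat false = true) := by
  intro D
  induction D with
  | nil => intro s x h; exact Or.inl h
  | cons i D ih =>
    intro s x h
    rcases ih _ x h with h1 | h1
    · exact mem_candAdd m alive pv nx s i x h1
    · exact Or.inr h1

lemma cand_fold_complete (m : Nat) (alive : List Bool) (pv nx : List Int) :
    ∀ (D : List Int) (s : PySem.Set Int) (i j : Int), i ∈ D →
    0 ≤ j → j < (m : Int) → alive.getD j.toNat false = true →
    (pv.getD i.toNat 0 = j ∨ nx.getD i.toNat 0 = j) →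
    j ∈ D.foldl (candAdd m alive pv nx) s := by
  intro D
  induction D with
  | nil => intro s i j hi; cases hi
  | cons x D ih =>
    intro s i j hi h0 hm hal hv
    rw [List.foldl_cons]
    rcases List.mem_cons.mp hi with heq | hi'
    · apply cand_fold_mono
      rw [← heq]
      unfold candAdd
      dsimp only
      rcases hv with hv | hv
      · rw [hv]
        have hin : j ∈ (if 0 ≤ j ∧ j < (m : Int) ∧ alive.getD j.toNat false = true
            then PySem.Set.add s j else s) := by
          rw [if_pos ⟨h0, hm, hal⟩]
          exact (PySem.Set.mem_add _ _ _).mpr (Or.inr rfl)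
        split
        · exact (PySem.Set.mem_add _ _ _).mpr (Or.inl hin)
        · exact hin
      · rw [hv, if_pos ⟨h0, hm, hal⟩]
        exact (PySem.Set.mem_add _ _ _).mpr (Or.inr rfl)
    · apply ih _ i j hi' h0 hm hal hv

lemma cand_fold_nodup (m : Nat) (alive : List Bool) (pv nx : List Int) :
    ∀ (D : List Int) (s : PySem.Set Int), s.Nodup →
    (D.foldl (candAdd m alive pv nx) s).Nodup := by
  intro D
  induction D with
  | nil => intro s h; exact h
  | cons i D ih =>
    intro s h
    apply ih
    unfold candAdd
    dsimp only
    split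
    · split
      · exact PySem.Set.nodup_add _ _ (PySem.Set.nodup_add _ _ h)
      · exact PySem.Set.nodup_add _ _ h
    · split
      · exact PySem.Set.nodup_add _ _ h
      · exact h

-- ---------- the full invariant and the outer loop ----------
def InvB (d0 : List Int) (a0 : List Int) (m : Nat)
    (T : List Int) (alive : List Bool) (pv nx cand : List Int) : Prop :=
  ChainOK m T ∧ LinkInv m T pv nx ∧
  alive.length = m ∧ pv.length = m ∧ nx.length = m ∧
  (∀ j : Nat, j < m → (alive.getD j false = true ↔ (j : Int) ∈ T)) ∧
  cand.Pairwise (· < ·) ∧ (∀ i ∈ cand, i ∈ T) ∧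
  (∀ i ∈ T, vd d0 i < ov a0 (pio T i) + ov a0 (nio T i) → i ∈ cand)

lemma length_filter_not (p : Int → Bool) : ∀ (l : List Int),
    (l.filter p).length + (l.filter (fun a => !p a)).length = l.length := by
  intro l
  induction l with
  | nil => rfl
  | cons x t ih =>
    rw [List.filter_cons, List.filter_cons]
    cases hp : p x <;> simp [hp] <;> try omega

lemma pairwise_le_nodup_lt (l : List Int) (h1 : l.Pairwise (· ≤ ·)) (h2 : l.Nodup) :
    l.Pairwise (· < ·) :=
  (h1.and h2).imp (fun hab => lt_of_le_of_ne hab.1 hab.2)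

lemma roundB (a0 d0 : List Int) (m : Nat) (T : List Int) (alive : List Bool)
    (pv nx cand : List Int) (hI : InvB d0 a0 m T alive pv nx cand) :
    cand.filter (fun i => decide (d0.getD i.toNat 0 < nbr a0 m pv nx i))
      = T.filter (fun i => decide (vd d0 i < ov a0 (pio T i) + ov a0 (nio T i))) := by
  obtain ⟨hC, hL, hal, hpl, hnl, halive, hcpw, hcsub, hccomp⟩ := hI
  have hndT : T.Nodup := pairwise_lt_nodup T hC.1
  have hnbr : ∀ i ∈ T, nbr a0 m pv nx i = ov a0 (pio T i) + ov a0 (nio T i) := by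
    intro i hi
    obtain ⟨h1, h2⟩ := hL i hi
    rw [nbr, h1, h2]
    congr 1
    · cases hp : pio T i with
      | none => simp [ov]
      | some p =>
        have hpC := pio_mem T i p hndT hi hp
        have := hC.2 p hpC
        rw [Option.getD_some, if_pos this.1, ov]
    · cases hq : nio T i with
      | none => simp [ov]
      | some q =>
        have hqC := nio_mem_of T i q hndT hi hq
        have := hC.2 q hqC
        rw [Option.getD_some, if_pos this.2, ov]
  apply sorted_mem_ext
  · exact hcpw.filter _
  · exact hC.1.filter _
  · intro x
    rw [List.mem_filter, List.mem_filter]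
    constructor
    · rintro ⟨hx, hfx⟩
      have hxT := hcsub x hx
      refine ⟨hxT, ?_⟩
      rw [decide_eq_true_eq] at hfx ⊢
      rw [← hnbr x hxT]
      exact hfx
    · rintro ⟨hx, hfx⟩
      rw [decide_eq_true_eq] at hfx
      refine ⟨hccomp x hx hfx, ?_⟩
      rw [decide_eq_true_eq, hnbr x hx]
      exact hfx

lemma outerB_eq (a0 d0 : List Int) (m : Nat) :
    ∀ (fuel : Nat) (T : List Int) (alive : List Bool) (pv nx cand : List Int) (c : List Int),
    InvB d0 a0 m T alive pv nx cand →
    outerB a0 d0 m fuel c.length alive pv nx cand (c ++ List.replicate fuel 0)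
      = c ++ refLoop a0 d0 fuel T
          ++ List.replicate (fuel - (refLoop a0 d0 fuel T).length) 0 := by
  intro fuel
  induction fuel with
  | zero => intro T alive pv nx cand c _; simp [outerB, refLoop]
  | succ fuel ih =>
    intro T alive pv nx cand c hI
    obtain ⟨hC, hL, hal, hpl, hnl, halive, hcpw, hcsub, hccomp⟩ := hI
    have hndT : T.Nodup := pairwise_lt_nodup T hC.1
    set failT : Int → Bool := fun i => decide (vd d0 i < ov a0 (pio T i) + ov a0 (nio T i))
      with hfailT
    set D := T.filter failT with hD
    have hdying : cand.filter (fun i => decide (d0.getD i.toNat 0 < nbr a0 m pv nx i)) = D :=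
      roundB a0 d0 m T alive pv nx cand ⟨hC, hL, hal, hpl, hnl, halive, hcpw, hcsub, hccomp⟩
    set T' := T.filter (fun i => !failT i) with hT'
    have hstep : stepI a0 d0 0 T = T' := by
      have h0 : (0 : Int) = ov a0 none := rfl
      rw [h0, stepI_filter a0 d0 T none hndT, hT']
      apply List.filter_congr
      intro i hi
      show decide (ov a0 (pioAux none T i) + ov a0 (nio T i) ≤ vd d0 i)
          = !decide (vd d0 i < ov a0 (pio T i) + ov a0 (nio T i))
      have hpa : pioAux none T i = pio T i := rfl
      rw [hpa]
      by_cases hc : ov a0 (pio T i) + ov a0 (nio T i) ≤ vd d0 i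
      · rw [decide_eq_true hc, decide_eq_false (by omega), Bool.not_false]
      · rw [decide_eq_false hc,
            decide_eq_true (by omega : vd d0 i < ov a0 (pio T i) + ov a0 (nio T i)),
            Bool.not_true]
    have hlensum : D.length + T'.length = T.length := by
      rw [hD, hT']
      exact length_filter_not failT T
    have hrefstep : refLoop a0 d0 (fuel + 1) T
        = if ((T.length : Int) - (T'.length : Int)) = 0 then []
          else ((T.length : Int) - (T'.length : Int)) :: refLoop a0 d0 fuel T' := by
      rw [refLoop, hstep]
    rw [outerB]
    by_cases hce : cand.isEmpty
    · rw [if_pos hce]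
      have hcnil : cand = [] := List.isEmpty_iff.mp hce
      have hDnil : D = [] := by rw [← hdying, hcnil]; rfl
      have hz : ((T.length : Int) - (T'.length : Int)) = 0 := by
        have : D.length = 0 := by rw [hDnil]; rfl
        omega
      rw [hrefstep, if_pos hz]
      simp
    · rw [if_neg hce]
      rw [hdying]
      by_cases hde : D.isEmpty
      · rw [if_pos hde]
        have hDnil : D = [] := List.isEmpty_iff.mp hde
        have hz : ((T.length : Int) - (T'.length : Int)) = 0 := by
          have : D.length = 0 := by rw [hDnil]; rfl
          omega
        rw [hrefstep, if_pos hz]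
        simp
      · rw [if_neg hde]
        have hDne : D ≠ [] := fun h => hde (by rw [h]; rfl)
        have hDlen : 0 < D.length := List.length_pos_of_ne_nil hDne
        have hz : ¬ ((T.length : Int) - (T'.length : Int)) = 0 := by omega
        -- the new state
        have hDsub : ∀ i ∈ D, i ∈ T := fun i hi => List.mem_of_mem_filter hi
        have hDnd : D.Nodup := pairwise_lt_nodup D (hC.1.filter _)
        obtain ⟨hLf, hplf, hnlf, houtf, hevf⟩ := splice_fold m D T pv nx hC hL hDnd hDsub hpl hnl
        have hfeq : T.filter (fun j => !(D.contains j)) = T' := by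
          rw [hT']
          apply List.filter_congr
          intro j hj
          by_cases hjD : j ∈ D
          · have hf : failT j = true := by
              have h := hjD; rw [hD] at h; exact (List.mem_filter.mp h).2
            simp [hjD, hf]
          · have hf : failT j = false := by
              cases hft : failT j
              · rfl
              · exact absurd (List.mem_filter.mpr ⟨hj, hft⟩)
                  (fun hc => hjD (by rw [hD]; exact hc))
            simp [hjD, hf]
        rw [hfeq] at hLf
        set st := D.foldl (spliceStep m) (pv, nx) with hst
        set alive' := D.foldl (fun al i => al.set i.toNat false) alive with halive'
        obtain ⟨halen', hach⟩ := mark_fold m D alive hal (fun i hi => hC.2 i (hDsub i hi))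
        have hCT' : ChainOK m T' := chainOK_filter m T _ hC
        have halmem' : ∀ j : Nat, j < m → (alive'.getD j false = true ↔ (j : Int) ∈ T') := by
          intro j hj
          rw [halive', hach j hj]
          constructor
          · intro h
            rw [Bool.and_eq_true, Bool.not_eq_eq_eq_not, Bool.not_true] at h
            have hjT : (j : Int) ∈ T := (halive j hj).mp h.1
            have hjD : (j : Int) ∉ D := by
              intro hc
              rw [List.contains_eq_mem, decide_eq_true hc] at h
              exact absurd h.2 (by simp)
            rw [hfeq.symm]
            refine List.mem_filter.mpr ⟨hjT, ?_⟩
            rw [List.contains_eq_mem, decide_eq_false hjD]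
            rfl
          · intro h
            rw [← hfeq] at h
            obtain ⟨hjT, hjnD⟩ := List.mem_filter.mp h
            rw [Bool.and_eq_true]
            refine ⟨(halive j hj).mpr hjT, ?_⟩
            rw [List.contains_eq_mem] at hjnD ⊢
            rw [Bool.not_eq_eq_eq_not, Bool.not_true]
            rw [Bool.not_eq_true'] at hjnD
            exact hjnD
        -- the new candidate list
        set S := D.foldl (candAdd m alive' st.1 st.2) PySem.Set.empty with hS
        set cand' := PySem.List.sorted S (fun x => x) false with hcand'
        have hSnodup : S.Nodup := cand_fold_nodup m alive' st.1 st.2 D PySem.Set.empty List.nodup_nil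
        have hcand'nodup : cand'.Nodup := (PySem.List.sorted_perm S (fun x => x) false).symm.nodup hSnodup
        have hcand'pw : cand'.Pairwise (· < ·) :=
          pairwise_le_nodup_lt cand' (PySem.List.sorted_pairwise S (fun x => x)) hcand'nodup
        have hmemcand' : ∀ x, x ∈ cand' ↔ x ∈ S := fun x =>
          PySem.List.mem_sorted S (fun x => x) false x
        have hcand'sub : ∀ x ∈ cand', x ∈ T' := by
          intro x hx
          rcases cand_fold_mem m alive' st.1 st.2 D PySem.Set.empty x
            (by rw [← hS]; exact (hmemcand' x).mp hx) with h | h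
          · cases h
          · have hxt : x.toNat < m := by omega
            have := (halmem' x.toNat hxt).mp h.2.2
            rwa [show ((x.toNat : Nat) : Int) = x by omega] at this
        have hcand'comp : ∀ i ∈ T',
            vd d0 i < ov a0 (pio T' i) + ov a0 (nio T' i) → i ∈ cand' := by
          intro i hiT' hfail'
          have hiT : i ∈ T := by
            have h := hiT'; rw [hT'] at h; exact List.mem_of_mem_filter h
          have hib := hC.2 i hiT
          have hikeep : failT i = false := by
            have h := hiT'; rw [hT'] at h
            have h2 : Bool.not (failT i) = true := (List.mem_filter.mp h).2
            rwa [Bool.not_eq_true'] at h2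
          have hikeep' : Bool.not (failT i) = true := by
            rw [Bool.not_eq_true']; exact hikeep
          have hialive' : alive'.getD i.toNat false = true := by
            have : ((i.toNat : Nat) : Int) = i := by omega
            rw [(halmem' i.toNat (by omega))]
            rw [this]
            exact hiT'
          have hinD : i ∉ D := by
            intro hc
            rw [hD] at hc
            have hf : failT i = true := (List.mem_filter.mp hc).2
            rw [hf] at hikeep
            exact absurd hikeep (by simp)
          -- some neighbour of i must have died
          have hkey : (∃ y, pio T i = some y ∧ y ∈ D) ∨ (∃ y, nio T i = some y ∧ y ∈ D) := by
            by_contra hno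
            push_neg at hno
            have hp' : pio T' i = pio T i := by
              cases hp : pio T i with
              | none =>
                exact (pio_filter_stable T _ i hndT hiT hikeep').1 hp
              | some y =>
                have hyT : y ∈ T := pio_mem T i y hndT hiT hp
                have hynD : y ∉ D := hno.1 y hp
                have hky : Bool.not (failT y) = true := by
                  rw [Bool.not_eq_true']
                  cases hft : failT y
                  · rfl
                  · exact absurd (List.mem_filter.mpr ⟨hyT, hft⟩)
                      (fun hc => hynD (by rw [hD]; exact hc))
                exact (pio_filter_stable T _ i hndT hiT hikeep').2 y hp hky
            have hq' : nio T' i = nio T i := by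
              cases hq : nio T i with
              | none =>
                exact (nio_filter_stable T _ i hndT hiT hikeep').1 hq
              | some y =>
                have hyT : y ∈ T := nio_mem_of T i y hndT hiT hq
                have hynD : y ∉ D := hno.2 y hq
                have hky : Bool.not (failT y) = true := by
                  rw [Bool.not_eq_true']
                  cases hft : failT y
                  · rfl
                  · exact absurd (List.mem_filter.mpr ⟨hyT, hft⟩)
                      (fun hc => hynD (by rw [hD]; exact hc))
                exact (nio_filter_stable T _ i hndT hiT hikeep').2 y hq hky
            rw [hp', hq'] at hfail'
            have : failT i = true := by rw [hfailT]; exact decide_eq_true hfail'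
            rw [this] at hikeep
            exact absurd hikeep (by simp)
          rw [hmemcand' i, hS]
          rcases hkey with ⟨y, hy, hyD⟩ | ⟨y, hy, hyD⟩
          · obtain ⟨iD, hiDD, hval⟩ := (hevf i hiT hinD).1 y hy hyD
            exact cand_fold_complete m alive' st.1 st.2 D PySem.Set.empty iD i hiDD
              hib.1 hib.2 hialive' (Or.inr hval)
          · obtain ⟨iD, hiDD, hval⟩ := (hevf i hiT hinD).2 y hy hyD
            exact cand_fold_complete m alive' st.1 st.2 D PySem.Set.empty iD i hiDD
              hib.1 hib.2 hialive' (Or.inl hval)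
        have hInv' : InvB d0 a0 m T' alive' st.1 st.2 cand' :=
          ⟨hCT', hLf, halen', hplf, hnlf, halmem', hcand'pw, hcand'sub, hcand'comp⟩
        -- the res update and the recursion
        have hres : (c ++ List.replicate (fuel + 1) (0 : Int)).set c.length ((D.length : Int))
            = (c ++ [(D.length : Int)]) ++ List.replicate fuel 0 := by
          rw [set_append_len]
          simp [List.replicate_succ]
        have hlen1 : c.length + 1 = (c ++ [(D.length : Int)]).length := by simp
        have hrec := ih T' alive' st.1 st.2 cand' (c ++ [(D.length : Int)]) hInv'
        rw [hrefstep, if_neg hz]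
        have hDlenInt : ((T.length : Int) - (T'.length : Int)) = (D.length : Int) := by omega
        rw [hDlenInt]
        dsimp only
        rw [hres, hlen1, hrec]
        have hx : (fuel + 1) - (((D.length : Int)) :: refLoop a0 d0 fuel T').length
            = fuel - (refLoop a0 d0 fuel T').length := by
          simp
        rw [hx]
        simp

-- ---------- the initial state ----------
lemma range_decomp (m k : Nat) (h : k < m) :
    List.range m = List.range k ++ k :: List.range' (k+1) (m-k-1) := by
  rw [List.range_eq_range', List.range_eq_range']
  have h2 : k + (m - k) = m := by omega
  have h3 := List.range'_append (s := 0) (m := k) (n := m - k) (step := 1)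
  obtain ⟨n, hn⟩ : ∃ n, m - k = n + 1 := ⟨m - k - 1, by omega⟩
  have h4 : m - k - 1 = n := by omega
  rw [h4]
  calc List.range' 0 m = List.range' 0 (k + (m - k)) := by rw [h2]
    _ = List.range' 0 k ++ List.range' (0 + 1 * k) (m - k) := h3.symm
    _ = List.range' 0 k ++ List.range' k (m - k) := by rw [Nat.zero_add, Nat.one_mul]
    _ = List.range' 0 k ++ (k :: List.range' (k + 1) n) := by
          rw [hn, List.range'_succ]

lemma getD_range_map (f : Nat → Int) (m k : Nat) (h : k < m) :
    ((List.range m).map f).getD k 0 = f k := by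
  rw [List.getD, List.getElem?_eq_getElem (by simpa using h)]
  simp

lemma T0_decomp (m k : Nat) (h : k < m) :
    (List.range m).map (fun k => Int.ofNat k)
      = ((List.range k).map (fun k => Int.ofNat k))
        ++ (Int.ofNat k) :: ((List.range' (k+1) (m-k-1)).map (fun k => Int.ofNat k)) := by
  rw [range_decomp m k h, List.map_append, List.map_cons]

lemma ofNat_notin_range_map (k : Nat) :
    Int.ofNat k ∉ (List.range k).map (fun k => Int.ofNat k) := by
  intro h
  obtain ⟨j, hj, hjk⟩ := List.mem_map.mp h
  rw [List.mem_range] at hj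
  have hjk' : j = k := Int.ofNat.inj hjk
  omega

lemma pio_T0 (m k : Nat) (h : k < m) :
    pio ((List.range m).map (fun k => Int.ofNat k)) (Int.ofNat k)
      = if k = 0 then none else some (Int.ofNat (k-1)) := by
  rw [T0_decomp m k h, pio_split _ _ _ (ofNat_notin_range_map k)]
  cases k with
  | zero => simp
  | succ k' =>
    rw [if_neg (by omega)]
    rw [List.range_succ, List.map_append]
    simp [List.getLast?_concat]

lemma nio_T0 (m k : Nat) (h : k < m) :
    nio ((List.range m).map (fun k => Int.ofNat k)) (Int.ofNat k)
      = if k + 1 < m then some (Int.ofNat (k+1)) else none := by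
  rw [T0_decomp m k h, nio_append _ _ _ (ofNat_notin_range_map k)]
  by_cases h2 : k + 1 < m
  · obtain ⟨n, hn⟩ : ∃ n, m - k - 1 = n + 1 := ⟨m - k - 2, by omega⟩
    rw [hn, List.range'_succ, List.map_cons, if_pos h2]
    rfl
  · have : m - k - 1 = 0 := by omega
    rw [this, if_neg h2]
    rfl

lemma init_inv (a0 d0 : List Int) (m : Nat) (hm : m = a0.length) :
    InvB d0 a0 m ((List.range m).map (fun k => Int.ofNat k))
      (List.replicate m true)
      ((List.range m).map (fun k => Int.ofNat k - 1))
      ((List.range m).map (fun k => Int.ofNat k + 1))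
      ((List.range m).map (fun k => Int.ofNat k)) := by
  have hpw : ((List.range m).map (fun k => Int.ofNat k)).Pairwise (· < ·) := by
    apply List.Pairwise.map
    · intro a b hab
      exact hab
    · exact (List.pairwise_lt_range).imp (by intro a b hab; simpa using hab)
  have hbnd : ∀ i ∈ (List.range m).map (fun k => Int.ofNat k), 0 ≤ i ∧ i < (m : Int) := by
    intro i hi
    obtain ⟨j, hj, rfl⟩ := List.mem_map.mp hi
    rw [List.mem_range] at hj
    constructor <;> simp <;> omega
  have hmemT0 : ∀ j : Nat, j < m → (Int.ofNat j) ∈ (List.range m).map (fun k => Int.ofNat k) := by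
    intro j hj
    exact List.mem_map.mpr ⟨j, List.mem_range.mpr hj, rfl⟩
  refine ⟨⟨hpw, hbnd⟩, ?_, by simp, by simp, by simp, ?_, hpw, fun i hi => hi, fun i hi _ => hi⟩
  · -- LinkInv
    intro i hi
    obtain ⟨k, hk, rfl⟩ := List.mem_map.mp hi
    rw [List.mem_range] at hk
    have htn : (Int.ofNat k).toNat = k := rfl
    rw [htn]
    constructor
    · rw [getD_range_map _ m k hk, pio_T0 m k hk]
      cases k with
      | zero => simp
      | succ k' =>
        rw [if_neg (by omega)]
        show Int.ofNat (k'+1) - 1 = _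
        simp
    · rw [getD_range_map _ m k hk, nio_T0 m k hk]
      by_cases h2 : k + 1 < m
      · rw [if_pos h2]
        show Int.ofNat k + 1 = _
        simp
      · rw [if_neg h2]
        show Int.ofNat k + 1 = (m : Int)
        simp
        omega
  · -- alive
    intro j hj
    constructor
    · intro _
      exact hmemT0 j hj
    · intro _
      rw [List.getD, List.getElem?_eq_getElem (by simpa using hj)]
      simp

lemma range_map_va (a0 : List Int) :
    ((List.range a0.length).map (fun k => Int.ofNat k)).map (va a0) = a0 := by
  apply List.ext_getElem (by simp)
  intro k h1 h2
  rw [List.getElem_map, List.getElem_map, List.getElem_range]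
  show va a0 (Int.ofNat k) = a0[k]
  rw [va, show (Int.ofNat k).toNat = k from rfl, List.getD, List.getElem?_eq_getElem h2]
  rfl

lemma range_map_vd (a0 d0 : List Int) (h : a0.length ≤ d0.length) :
    ((List.range a0.length).map (fun k => Int.ofNat k)).map (vd d0) = d0.take a0.length := by
  apply List.ext_getElem (by simp [List.length_take_of_le h])
  intro k h1 h2
  have hk : k < a0.length := by simpa using h1
  have hkd : k < d0.length := by omega
  rw [List.getElem_map, List.getElem_map, List.getElem_range, List.getElem_take]
  show vd d0 (Int.ofNat k) = d0[k]
  rw [vd, show (Int.ofNat k).toNat = k from rfl, List.getD, List.getElem?_eq_getElem hkd]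
  rfl

-- ===== VERDICT (by name: the statement is the Claim_ definition above) =====
theorem solve_spec : Claim_equal_solve := by
  intro n a d _ hpre
  unfold Spec_solve solve solve_alt
  rcases le_or_gt n 0 with hn | hn
  · rw [Int.toNat_of_nonpos hn]
    simp [outerA, outerB]
  · have hlen : a.length ≤ d.length := by
      rcases hpre with h | h
      · omega
      · exact h
    have h0 : ([] : List Int).length = 0 := rfl
    have hA := outerA_eq n.toNat a d a.length [] le_rfl hlen
    rw [h0] at hA
    simp only [List.nil_append] at hA
    rw [hA, List.take_length]
    have hB := outerB_eq a d a.length n.toNat ((List.range a.length).map (fun k => Int.ofNat k))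
      (List.replicate a.length true)
      ((List.range a.length).map (fun k => Int.ofNat k - 1))
      ((List.range a.length).map (fun k => Int.ofNat k + 1))
      ((List.range a.length).map (fun k => Int.ofNat k)) []
      (init_inv a d a.length rfl)
    rw [h0] at hB
    simp only [List.nil_append] at hB
    rw [hB]
    have := altLoop_ref a d n.toNat ((List.range a.length).map (fun k => Int.ofNat k))
    rw [range_map_va, range_map_vd a d hlen] at this
    rw [this]
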